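-- pv_equiv track=rewrite | github.com/dancinlab/papers | scripts/manifest_update.py | _match_log_to_entry
-- ===== SOURCE A (Python) =====
-- def _match_log_to_entry(manifest: dict, log: dict) -> int:
--     papers = manifest.get("papers", [])
--     # prefer zenodo record id match
--     rec = log["record_id"]
--     for i, p in enumerate(papers):
--         for key in ("zenodo_record", "zenodo_doi", "doi"):
--             v = p.get(key, "") or ""
--             if rec in str(v):
--                 return i
--     # next: label match (e.g., PA-11, N6-FUSION-1)
--     lbl = log.get("label")
--     if lbl:
--         for i, p in enumerate(papers):
--             pid = p.get("id", "")
--             # PA-11b <-> PA-11 variant tolerance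
--             if pid == lbl:
--                 return i
--             if pid.startswith(lbl) or lbl.startswith(pid):
--                 return i
--     return -1
-- ===== SOURCE B (Python) =====
-- def _match_log_to_entry(manifest: dict, log: dict) -> int:
--     rec = log["record_id"]
--     lbl = log.get("label")
--     fallback = None
--     for i, p in enumerate(manifest.get("papers", [])):
--         if (rec in str(p.get("zenodo_record", "") or "")
--                 or rec in str(p.get("zenodo_doi", "") or "")
--                 or rec in str(p.get("doi", "") or "")):
--             return i
--         if lbl and fallback is None:
--             pid = p.get("id", "")
--             if pid == lbl or pid.startswith(lbl) or lbl.startswith(pid):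
--                 fallback = i
--     return fallback if fallback is not None else -1
-- ===== Notes on version B (the rewrite author's own statement) =====
-- stated objective: alternative
-- what changed: Collapses A's two sequential scans over the papers into a single pass that returns immediately on a record-id match and carries the first label-match index as a fallback returned only after the whole list is traversed; Pre_ excludes logs without a 'record_id' key, on which both programs raise KeyError.
import Mathlib
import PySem

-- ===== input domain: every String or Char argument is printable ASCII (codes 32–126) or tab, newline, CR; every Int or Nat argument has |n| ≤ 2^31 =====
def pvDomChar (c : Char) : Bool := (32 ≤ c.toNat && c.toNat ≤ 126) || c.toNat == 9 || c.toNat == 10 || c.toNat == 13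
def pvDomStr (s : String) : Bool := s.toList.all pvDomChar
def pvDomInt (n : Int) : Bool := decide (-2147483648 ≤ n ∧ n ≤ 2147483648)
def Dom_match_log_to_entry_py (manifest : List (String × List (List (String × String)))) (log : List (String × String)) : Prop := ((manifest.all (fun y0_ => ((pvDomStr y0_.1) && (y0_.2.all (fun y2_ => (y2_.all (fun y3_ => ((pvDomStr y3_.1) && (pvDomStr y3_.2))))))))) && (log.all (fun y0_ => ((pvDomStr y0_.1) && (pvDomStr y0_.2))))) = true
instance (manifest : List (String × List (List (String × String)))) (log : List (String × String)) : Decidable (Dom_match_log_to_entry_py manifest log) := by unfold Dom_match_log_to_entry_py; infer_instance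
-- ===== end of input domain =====

-- B collapses A's two sequential scans into one pass carrying a label-match fallback index.
-- Pre_ excludes logs without a "record_id" key, on which both Pythons raise KeyError.

-- dict.get(key, default) on an association list (first match), shared dict primitive
def dgetD (d : List (String × String)) (k dflt : String) : String :=
  match d.find? (fun p => p.1 == k) with
  | some p => p.2
  | none => dflt

-- dict.get(key) returning Option (None if absent)
def dget? (d : List (String × String)) (k : String) : Option String :=
  (d.find? (fun p => p.1 == k)).map (·.2)

-- ===== PORT A =====
-- 'for key in ("zenodo_record","zenodo_doi","doi"): if rec in str(p.get(key,"") or ""): return i'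
-- ('or ""' and 'str' are identities on strings)
def aRecMatch (rec : String) (p : List (String × String)) : Bool :=
  ["zenodo_record", "zenodo_doi", "doi"].any (fun k => PySem.Str.isIn rec (dgetD p k ""))

-- first scan: first i with a record-id match
def aScanRec (rec : String) (i : Int) : List (List (String × String)) → Option Int
  | [] => none
  | p :: ps => if aRecMatch rec p then some i else aScanRec rec (i + 1) ps

-- second scan: first i with a label match (pid == lbl, or mutual prefix)
def aScanLbl (lbl : String) (i : Int) : List (List (String × String)) → Option Int
  | [] => none
  | p :: ps =>
    let pid := dgetD p "id" ""
    if pid = lbl then some i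
    else if PySem.Str.startswith pid lbl || PySem.Str.startswith lbl pid then some i
    else aScanLbl lbl (i + 1) ps

def match_log_to_entry_py (manifest : List (String × List (List (String × String)))) (log : List (String × String)) : Int :=
  let papers := ((manifest.find? (fun p => p.1 == "papers")).map (·.2)).getD []
  let rec_ := dgetD log "record_id" ""   -- Pre_ guarantees the key is present (KeyError otherwise)
  match aScanRec rec_ 0 papers with
  | some i => i
  | none =>
    match dget? log "label" with
    | some lbl =>
      if lbl ≠ "" then
        match aScanLbl lbl 0 papers with
        | some i => i
        | none => -1
      else -1
    | none => -1

-- ===== PORT B =====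
def bRecMatch (rec : String) (p : List (String × String)) : Bool :=
  PySem.Str.isIn rec (dgetD p "zenodo_record" "")
  || PySem.Str.isIn rec (dgetD p "zenodo_doi" "")
  || PySem.Str.isIn rec (dgetD p "doi" "")

def bLblTruthy : Option String → Bool
  | some l => l ≠ ""
  | none => false

def bLblMatch (lbl : String) (p : List (String × String)) : Bool :=
  let pid := dgetD p "id" ""
  pid = lbl || PySem.Str.startswith pid lbl || PySem.Str.startswith lbl pid

-- single pass: early return on record match, first label match kept as fallback
def bLoop (rec : String) (lbl : Option String) (i : Int) (fb : Option Int) :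
    List (List (String × String)) → Int
  | [] => fb.getD (-1)
  | p :: ps =>
    if bRecMatch rec p then i
    else
      let fb' := if bLblTruthy lbl && fb.isNone && bLblMatch (lbl.getD "") p then some i else fb
      bLoop rec lbl (i + 1) fb' ps

def match_log_to_entry_py_alt (manifest : List (String × List (List (String × String)))) (log : List (String × String)) : Int :=
  let rec_ := dgetD log "record_id" ""   -- Pre_ guarantees the key is present
  let lbl := dget? log "label"
  let papers := ((manifest.find? (fun p => p.1 == "papers")).map (·.2)).getD []
  bLoop rec_ lbl 0 none papers

-- ===== PRECONDITION & SPEC =====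
-- A raises KeyError iff log has no "record_id" key; Pre_ admits exactly the other inputs.
def Pre_match_log_to_entry_py (manifest : List (String × List (List (String × String)))) (log : List (String × String)) : Prop :=
  "record_id" ∈ log.map Prod.fst
instance (manifest : List (String × List (List (String × String)))) (log : List (String × String)) : Decidable (Pre_match_log_to_entry_py manifest log) := by unfold Pre_match_log_to_entry_py; infer_instance

def pvWitness_match_log_to_entry_py : (List (String × List (List (String × String)))) × (List (String × String)) :=
  ([("papers", [[("id", "PA-11")]])], [("record_id", "123"), ("label", "PA-11b")])

def Spec_match_log_to_entry_py (manifest : List (String × List (List (String × String)))) (log : List (String × String)) (out : Int) : Prop := out = match_log_to_entry_py_alt manifest log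
instance (manifest : List (String × List (List (String × String)))) (log : List (String × String)) (out : Int) : Decidable (Spec_match_log_to_entry_py manifest log out) := by unfold Spec_match_log_to_entry_py; infer_instance

-- ===== CLAIM (what is proved, stated in full; the proofs are below) =====
def Claim_equal_match_log_to_entry_py : Prop := ∀ (manifest : List (String × List (List (String × String)))) (log : List (String × String)), Dom_match_log_to_entry_py manifest log → Pre_match_log_to_entry_py manifest log → Spec_match_log_to_entry_py manifest log (match_log_to_entry_py manifest log)

-- ===== LEMMAS AND PROOFS =====

-- the record and label match tests agree
theorem recMatch_eq (rec : String) (p : List (String × String)) :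
    aRecMatch rec p = bRecMatch rec p := by
  simp [aRecMatch, bRecMatch, List.any, Bool.or_assoc]

-- one step of A's label scan is a test with B's combined label predicate
theorem aScanLbl_cons (lbl : String) (i : Int) (p : List (String × String))
    (ps : List (List (String × String))) :
    aScanLbl lbl i (p :: ps) =
      if bLblMatch lbl p then some i else aScanLbl lbl (i + 1) ps := by
  simp only [aScanLbl, bLblMatch]
  by_cases h1 : dgetD p "id" "" = lbl <;>
    by_cases h2 : PySem.Str.startswith (dgetD p "id" "") lbl <;>
      by_cases h3 : PySem.Str.startswith lbl (dgetD p "id" "") <;>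
        simp [h1, h2, h3]

-- the single pass equals: first record match, else fallback-or-label-scan
theorem bLoop_eq (rec : String) (lbl : Option String)
    (ps : List (List (String × String))) :
    ∀ (i : Int) (fb : Option Int),
    bLoop rec lbl i fb ps =
      match aScanRec rec i ps with
      | some j => j
      | none =>
        (fb.or (if bLblTruthy lbl then aScanLbl (lbl.getD "") i ps else none)).getD (-1) := by
  induction ps with
  | nil =>
    intro i fb
    cases fb <;> cases ht : bLblTruthy lbl <;> simp [bLoop, aScanRec, aScanLbl, ht]
  | cons p ps ih =>
    intro i fb
    by_cases hr : bRecMatch rec p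
    · simp [bLoop, aScanRec, recMatch_eq, hr]
    · rw [show bLoop rec lbl i fb (p :: ps) =
        bLoop rec lbl (i + 1)
          (if bLblTruthy lbl && fb.isNone && bLblMatch (lbl.getD "") p then some i else fb) ps
        from by simp [bLoop, hr]]
      rw [ih]
      rw [show aScanRec rec i (p :: ps) = aScanRec rec (i + 1) ps
        from by simp [aScanRec, recMatch_eq, hr]]
      cases hA : aScanRec rec (i + 1) ps with
      | some j => simp
      | none =>
        simp only []
        congr 1
        cases ht : bLblTruthy lbl with
        | false => simp [ht]
        | true =>
          rw [aScanLbl_cons]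
          cases fb with
          | some j => simp [ht]
          | none => by_cases hm : bLblMatch (lbl.getD "") p <;> simp [ht, hm]

-- ===== VERDICT (by name: the statement is the Claim_ definition above) =====
theorem match_log_to_entry_py_spec : Claim_equal_match_log_to_entry_py := by
  intro manifest log _ _
  unfold Spec_match_log_to_entry_py match_log_to_entry_py match_log_to_entry_py_alt
  rw [bLoop_eq]
  cases hA : aScanRec (dgetD log "record_id" "") 0
      (((manifest.find? (fun p => p.1 == "papers")).map (·.2)).getD []) with
  | some j => simp [hA]
  | none =>
    cases hl : dget? log "label" with
    | none => simp [hA, hl, bLblTruthy]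
    | some l =>
      by_cases he : l = ""
      · simp [hA, hl, he, bLblTruthy]
      · cases hL : aScanLbl l 0
            (((manifest.find? (fun p => p.1 == "papers")).map (·.2)).getD []) <;>
          simp [hA, hl, he, bLblTruthy, hL]
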